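-- pv_equiv track=rewrite | github.com/younisrahman/AlgoExpert | Medium/73TaskAssignment.py | getTaskDurationToIndices
-- ===== SOURCE A (Python) =====
-- def getTaskDurationToIndices(tasks):
--     taskDurationsToIndices = {}
--
--     for idx, taskDuration in enumerate(tasks):
--         if taskDuration in taskDurationsToIndices:
--             taskDurationsToIndices[taskDuration].append(idx)
--         else:
--             taskDurationsToIndices[taskDuration] = [idx]
--
--     return taskDurationsToIndices
-- ===== SOURCE B (Python) =====
-- def getTaskDurationToIndices(tasks):
--     # dict-comprehension over first-occurrence-ordered distinct durations;
--     # each value is gathered by a full scan instead of incremental appends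
--     return {d: [i for i, t in enumerate(tasks) if t == d]
--             for d in dict.fromkeys(tasks)}
-- ===== Notes on version B (the rewrite author's own statement) =====
-- stated objective: alternative
-- what changed: Replaces the single-pass dict-of-appends loop by a dict comprehension: distinct durations via dict.fromkeys, then one full enumerate scan per duration collecting its indices.
import Mathlib
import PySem

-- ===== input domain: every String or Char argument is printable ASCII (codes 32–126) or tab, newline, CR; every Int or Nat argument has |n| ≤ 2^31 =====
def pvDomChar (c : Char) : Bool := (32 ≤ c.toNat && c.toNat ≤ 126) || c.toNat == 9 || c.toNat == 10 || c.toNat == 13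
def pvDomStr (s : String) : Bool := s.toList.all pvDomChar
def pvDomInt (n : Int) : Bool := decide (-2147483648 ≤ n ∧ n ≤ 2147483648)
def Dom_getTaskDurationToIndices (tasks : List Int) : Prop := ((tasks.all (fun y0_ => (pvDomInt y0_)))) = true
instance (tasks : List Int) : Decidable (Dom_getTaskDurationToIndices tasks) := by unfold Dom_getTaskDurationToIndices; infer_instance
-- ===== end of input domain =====

-- B rebuilds the table by a dict comprehension over the deduped durations (alternative decomposition; return values proved equal).
-- ===== PORT A =====
def getTaskDurationToIndices (tasks : List Int) : List (Int × List Int) :=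
  ((PySem.List.enumerate tasks 0).foldl
    (fun d p =>
      if d.contains p.2 then d.modify p.2 [] (fun l => l ++ [p.1])
      else d.insert p.2 [p.1])
    PySem.Dict.empty).items

-- ===== PORT B =====
def getTaskDurationToIndices_alt (tasks : List Int) : List (Int × List Int) :=
  (PySem.List.dedup tasks).map (fun d =>
    (d, (PySem.List.enumerate tasks 0).filterMap (fun p => if p.2 = d then some p.1 else none)))

-- ===== PRECONDITION & SPEC =====
def Spec_getTaskDurationToIndices (tasks : List Int) (out : List (Int × List Int)) : Prop := out = getTaskDurationToIndices_alt tasks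
instance (tasks : List Int) (out : List (Int × List Int)) : Decidable (Spec_getTaskDurationToIndices tasks out) := by unfold Spec_getTaskDurationToIndices; infer_instance

-- ===== CLAIM (what is proved, stated in full; the proofs are below) =====
def Claim_equal_getTaskDurationToIndices : Prop := ∀ (tasks : List Int), Dom_getTaskDurationToIndices tasks → Spec_getTaskDurationToIndices tasks (getTaskDurationToIndices tasks)

-- ===== LEMMAS AND PROOFS =====

-- A's loop body is extensionally 'modify key [] (· ++ [idx])' on every dict state.
theorem stepA_eq_modify (d : PySem.Dict Int (List Int)) (p : Int × Int) :
    (if d.contains p.2 then d.modify p.2 [] (fun l => l ++ [p.1])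
     else d.insert p.2 [p.1]) = d.modify p.2 [] (fun l => l ++ [p.1]) := by
  by_cases h : d.contains p.2 = true
  · simp [h]
  · have h' : d.contains p.2 = false := by simpa using h
    rw [if_neg h]
    simp [PySem.Dict.modify, PySem.Dict.getD_of_not_contains _ _ h']

-- filter-then-map-first-component = the filterMap B uses
theorem filter_map_eq_filterMap (l : List (Int × Int)) (c : Int) :
    ((l.filter (fun p => p.2 == c)).map (·.1))
      = l.filterMap (fun p => if p.2 = c then some p.1 else none) := by
  induction l with
  | nil => rfl
  | cons x t ih =>
      by_cases h : x.2 = c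
      · simp [h, ih]
      · simp [h, ih]

theorem getTaskDurationToIndices_eq (tasks : List Int) :
    getTaskDurationToIndices tasks = getTaskDurationToIndices_alt tasks := by
  unfold getTaskDurationToIndices getTaskDurationToIndices_alt
  rw [PySem.List.foldl_congr_mem (PySem.List.enumerate tasks 0)
        (fun d p => if d.contains p.2 then d.modify p.2 [] (fun l => l ++ [p.1])
                    else d.insert p.2 [p.1])
        (fun d p => d.modify p.2 [] (fun l => l ++ [p.1]))
        PySem.Dict.empty
        (fun acc x _ => stepA_eq_modify acc x)]
  set E := PySem.List.enumerate tasks 0 with hE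
  set D := E.foldl (fun d p => d.modify p.2 [] (fun l => l ++ [p.1])) PySem.Dict.empty with hD
  have hkeys : D.keys = PySem.List.dedup tasks := by
    rw [hD, PySem.Dict.keys_foldl_modify_key]
    simp only [PySem.Dict.keys_empty, PySem.Set.update, PySem.List.dedup_eq_ofList,
      PySem.Set.ofList_eq_foldl]
    rw [hE, PySem.List.map_snd_enumerate]
  have hnd : D.keys.Nodup := by
    rw [hkeys]; exact PySem.List.nodup_dedup tasks
  have hget : ∀ c : Int, D.getD c [] =
      E.filterMap (fun p => if p.2 = c then some p.1 else none) := by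
    intro c
    have := PySem.Dict.getD_foldl_modify_append (l := E.map (fun p => (p.2, p.1)))
      (d := PySem.Dict.empty) (c := c)
    rw [List.foldl_map] at this
    simp only [← hD] at this
    rw [this, PySem.Dict.getD_empty]
    rw [List.filter_map, List.map_map, ← filter_map_eq_filterMap]
    rfl
  rw [PySem.Dict.items_eq_map_keys D hnd [], hkeys]
  exact List.map_congr_left (fun d _ => by rw [hget d])

-- ===== VERDICT (by name: the statement is the Claim_ definition above) =====
theorem getTaskDurationToIndices_spec : Claim_equal_getTaskDurationToIndices := by
  intro tasks _
  unfold Spec_getTaskDurationToIndices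
  exact getTaskDurationToIndices_eq tasks
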